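-- pv_equiv track=rewrite | github.com/JJLLWW/google_kick_start | 2022_round_A/q1.py | solve
-- ===== SOURCE A (Python) =====
-- def solve(P, I):
--     n_ops, j = 0, 0
--     for i in range(len(P)):
--         # if we have already matched all characters of I, just delete all remaing members of P.
--         if j >= len(I):
--             n_ops += len(P) - i
--             break
--         elif P[i] == I[j]:
--             j += 1
--         else:
--             n_ops += 1
--     # I = "abc", if all matched j == 3, otherwise j < 3.
--     return None if j < len(I) else n_ops
-- ===== SOURCE B (Python) =====
-- def solve(P, I):
--     it = iter(P)
--     if all(c in it for c in I):
--         return len(P) - len(I)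
--     return None
-- ===== Notes on version B (the rewrite author's own statement) =====
-- stated objective: idiomatic
-- what changed: B drives the greedy scan from I via a consumed iterator over P (the standard `all(c in it for c in I)` subsequence idiom) and recovers the deletion count in closed form as len(P)-len(I), instead of A's index/counter loop over P.
import Mathlib
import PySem

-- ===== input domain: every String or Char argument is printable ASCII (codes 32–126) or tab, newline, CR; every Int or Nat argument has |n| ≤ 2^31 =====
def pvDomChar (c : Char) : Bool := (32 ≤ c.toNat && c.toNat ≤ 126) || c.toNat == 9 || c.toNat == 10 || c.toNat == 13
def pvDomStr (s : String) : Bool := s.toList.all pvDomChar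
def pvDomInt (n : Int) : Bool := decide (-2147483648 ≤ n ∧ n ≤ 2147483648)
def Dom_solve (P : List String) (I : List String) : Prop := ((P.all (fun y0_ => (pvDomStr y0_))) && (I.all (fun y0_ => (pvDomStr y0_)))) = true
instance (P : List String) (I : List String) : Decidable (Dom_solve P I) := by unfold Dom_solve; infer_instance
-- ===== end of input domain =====

-- B replaces A's index/counter loop over P by the iterator-style subsequence check driven by I,
-- with the deletion count recovered in closed form as len(P) - len(I) (objective: idiomatic).


-- ===== PORT A =====
-- the for-loop over range(len(P)) with state (n_ops, j); on rem = P[i:], len(P)-i = rem.length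
def solveLoop (I : List String) : List String → Int → Nat → Int × Nat
  | [], n_ops, j => (n_ops, j)
  | p :: ps, n_ops, j =>
    if I.length ≤ j then (n_ops + (1 + (ps.length : Int)), j)
    else if PySem.List.pyGet? I (j : Int) = some p then solveLoop I ps n_ops (j + 1)
    else solveLoop I ps (n_ops + 1) j

def solve (P : List String) (I : List String) : Option Int :=
  let r := solveLoop I P 0 0
  if r.2 < I.length then none else some r.1

-- ===== PORT B =====
-- `c in it`: scan the rest of P for c, returning what remains after the match (none = iterator exhausted)
def consumeTo (c : String) : List String → Option (List String)
  | [] => none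
  | p :: ps => if p = c then some ps else consumeTo c ps

-- `all(c in it for c in I)`
def isSubSeq : List String → List String → Bool
  | [], _ => true
  | c :: cs, P =>
    match consumeTo c P with
    | none => false
    | some P' => isSubSeq cs P'

def solve_alt (P : List String) (I : List String) : Option Int :=
  if isSubSeq I P then some ((P.length : Int) - (I.length : Int)) else none

-- ===== PRECONDITION & SPEC =====
def Spec_solve (P : List String) (I : List String) (out : Option Int) : Prop := out = solve_alt P I
instance (P : List String) (I : List String) (out : Option Int) : Decidable (Spec_solve P I out) := by unfold Spec_solve; infer_instance

-- ===== CLAIM (what is proved, stated in full; the proofs are below) =====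
def Claim_equal_solve : Prop := ∀ (P : List String) (I : List String), Dom_solve P I → Spec_solve P I (solve P I)

-- ===== LEMMAS AND PROOFS =====

lemma solveLoop_char (I : List String) :
    ∀ (rem : List String) (j : Nat) (n_ops : Int), j ≤ I.length →
      (isSubSeq (I.drop j) rem = true →
        solveLoop I rem n_ops j = (n_ops + (rem.length : Int) - ((I.length : Int) - (j : Int)), I.length)) ∧
      (isSubSeq (I.drop j) rem = false → (solveLoop I rem n_ops j).2 < I.length) := by
  intro rem
  induction rem with
  | nil =>
    intro j n_ops hj
    rcases Nat.lt_or_ge j I.length with hlt | hge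
    · have hdrop := List.drop_eq_getElem_cons hlt
      constructor
      · intro htrue
        rw [hdrop] at htrue
        simp [isSubSeq, consumeTo] at htrue
      · intro _; simpa [solveLoop] using hlt
    · have hj' : j = I.length := le_antisymm hj hge
      constructor
      · intro _
        subst hj'
        simp [solveLoop]
      · intro hfalse
        rw [List.drop_eq_nil_of_le (by omega)] at hfalse
        simp [isSubSeq] at hfalse
  | cons p ps ih =>
    intro j n_ops hj
    rcases Nat.lt_or_ge j I.length with hlt | hge
    · have hdrop := List.drop_eq_getElem_cons hlt
      have hget : PySem.List.pyGet? I (j : Int) = some I[j] := by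
        rw [PySem.List.pyGet?_natCast]
        exact List.getElem?_eq_getElem hlt
      by_cases heq : I[j] = p
      · -- match: consume one element of I and of P
        have hstep : solveLoop I (p :: ps) n_ops j = solveLoop I ps n_ops (j + 1) := by
          simp only [solveLoop]
          rw [if_neg (Nat.not_le.mpr hlt), if_pos (by rw [hget, heq])]
        have hsub : isSubSeq (I.drop j) (p :: ps) = isSubSeq (I.drop (j + 1)) ps := by
          rw [hdrop]; simp [isSubSeq, consumeTo, heq]
        obtain ⟨h1, h2⟩ := ih (j + 1) n_ops (by omega)
        constructor
        · intro htrue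
          rw [hstep, h1 (by rw [← hsub]; exact htrue), Prod.mk.injEq]
          exact ⟨by simp only [List.length_cons]; push_cast; ring, rfl⟩
        · intro hfalse
          rw [hstep]
          exact h2 (by rw [← hsub]; exact hfalse)
      · -- mismatch: delete p
        have hne : ¬ PySem.List.pyGet? I (j : Int) = some p := by
          rw [hget]; simpa using heq
        have hstep : solveLoop I (p :: ps) n_ops j = solveLoop I ps (n_ops + 1) j := by
          simp only [solveLoop]
          rw [if_neg (Nat.not_le.mpr hlt), if_neg hne]
        have hsub : isSubSeq (I.drop j) (p :: ps) = isSubSeq (I.drop j) ps := by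
          rw [hdrop]; simp [isSubSeq, consumeTo, Ne.symm heq]
        obtain ⟨h1, h2⟩ := ih j (n_ops + 1) hj
        constructor
        · intro htrue
          rw [hstep, h1 (by rw [← hsub]; exact htrue), Prod.mk.injEq]
          exact ⟨by simp only [List.length_cons]; push_cast; ring, rfl⟩
        · intro hfalse
          rw [hstep]
          exact h2 (by rw [← hsub]; exact hfalse)
    · -- j = len(I): delete everything remaining
      have hj' : j = I.length := le_antisymm hj hge
      subst hj'
      constructor
      · intro _
        rw [Prod.mk.injEq]
        exact ⟨by simp only [solveLoop, if_pos (le_refl I.length), List.length_cons]; push_cast; ring, by simp [solveLoop]⟩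
      · intro hfalse
        rw [List.drop_eq_nil_of_le (le_refl _)] at hfalse
        simp [isSubSeq] at hfalse

-- ===== VERDICT (by name: the statement is the Claim_ definition above) =====
theorem solve_spec : Claim_equal_solve := by
  intro P I _
  unfold Spec_solve solve solve_alt
  obtain ⟨h1, h2⟩ := solveLoop_char I P 0 0 (Nat.zero_le _)
  cases hsub : isSubSeq I P with
  | true =>
    have := h1 (by simpa using hsub)
    simp only [this]
    norm_num
  | false =>
    have := h2 (by simpa using hsub)
    simp [this]
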